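-- pv_equiv track=rewrite | github.com/alexandraback/datacollection | solutions_5631989306621952_1/Python/Idiotton/prob_a.py | f
-- ===== SOURCE A (Python) =====
-- def f(s):
--     maxChar = None
--     ans = []
--
--     for c in s:
--         if (maxChar == None or c >= maxChar):
--             ans.insert(0, c)
--             maxChar = c
--         else:
--             ans.append(c)
--
--     return ''.join(ans)
-- ===== SOURCE B (Python) =====
-- def f(s):
--     # pass 1: materialise the prefix-maximum table
--     pm = []
--     for c in s:
--         pm.append(c if not pm else max(pm[-1], c))
--     # pass 2: classify against the table (no running state)
--     front = [c for c, m in zip(s, pm) if c == m]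
--     back = [c for c, m in zip(s, pm) if c != m]
--     return ''.join(reversed(front)) + ''.join(back)
-- ===== Notes on version B (the rewrite author's own statement) =====
-- stated objective: faster
-- what changed: Replaces the single stateful loop that mutates a running max and does list.insert(0,..) with a two-pass decomposition: first materialise the prefix-maximum table, then classify each char as front-record (c == pm[i]) or back, and return reversed(front)+back.
import Mathlib
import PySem

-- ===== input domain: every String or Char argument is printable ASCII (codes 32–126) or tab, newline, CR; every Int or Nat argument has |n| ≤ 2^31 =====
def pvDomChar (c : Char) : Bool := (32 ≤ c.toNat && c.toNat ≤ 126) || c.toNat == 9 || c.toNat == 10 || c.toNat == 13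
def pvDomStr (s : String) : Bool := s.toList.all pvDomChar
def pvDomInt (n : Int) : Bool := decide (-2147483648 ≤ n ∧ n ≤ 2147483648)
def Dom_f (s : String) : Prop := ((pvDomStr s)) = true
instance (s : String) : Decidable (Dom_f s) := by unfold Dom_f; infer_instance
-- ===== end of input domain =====

-- B replaces A's single stateful loop (running max + O(n) insert(0)) by a two-pass
-- decomposition: materialise the prefix-maximum table, classify, concatenate (faster: O(n) vs O(n^2)).

-- ===== PORT A =====
-- A: one loop, state (maxChar, ans); record chars are inserted at position 0.
def f (s : String) : String :=
  let st := s.toList.foldl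
    (fun (st : Option Char × List Char) c =>
      if (match st.1 with | none => true | some m => decide (m ≤ c)) = true
      then (some c, c :: st.2)
      else (st.1, st.2 ++ [c]))
    (none, [])
  String.mk st.2

-- ===== PORT B =====
-- B: pass 1 builds the prefix-maximum table pm; pass 2 classifies against it.
def f_alt (s : String) : String :=
  let l := s.toList
  let pm := l.foldl
    (fun (pm : List Char) c =>
      pm ++ [match pm.getLast? with | none => c | some m => max m c]) []
  let front := ((l.zip pm).filter (fun p => p.1 == p.2)).map (·.1)
  let back := ((l.zip pm).filter (fun p => p.1 != p.2)).map (·.1)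
  String.mk (front.reverse ++ back)

-- ===== PRECONDITION & SPEC =====
def Spec_f (s : String) (out : String) : Prop := out = f_alt s
instance (s : String) (out : String) : Decidable (Spec_f s out) := by unfold Spec_f; infer_instance

-- ===== CLAIM (what is proved, stated in full; the proofs are below) =====
def Claim_equal_f : Prop := ∀ (s : String), Dom_f s → Spec_f s (f s)

-- ===== LEMMAS AND PROOFS =====

-- reference splitter: records / non-records of a list under a running max
def pvGo : Option Char → List Char → List Char × List Char
  | _, [] => ([], [])
  | mc, c :: t =>
    if (match mc with | none => true | some m => decide (m ≤ c)) = true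
    then ((pvGo (some c) t).1 ++ [c], (pvGo (some c) t).2)
    else ((pvGo mc t).1, c :: (pvGo mc t).2)

-- A's fold in terms of pvGo
theorem pvA_fold (l : List Char) : ∀ (mc : Option Char) (ans : List Char),
    (l.foldl (fun (st : Option Char × List Char) c =>
      if (match st.1 with | none => true | some m => decide (m ≤ c)) = true
      then (some c, c :: st.2)
      else (st.1, st.2 ++ [c])) (mc, ans)).2
    = (pvGo mc l).1 ++ ans ++ (pvGo mc l).2 := by
  induction l with
  | nil => intro mc ans; simp [pvGo]
  | cons c t ih =>
    intro mc ans
    simp only [List.foldl, pvGo]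
    by_cases h : (match mc with | none => true | some m => decide (m ≤ c)) = true
    · simp [h, ih]
    · simp [h, ih]

-- reference prefix-max table
def pvPm : Option Char → List Char → List Char
  | _, [] => []
  | mc, c :: t =>
    let m := match mc with | none => c | some m => max m c
    m :: pvPm (some m) t

-- B's table fold in terms of pvPm
theorem pvB_pm (l : List Char) : ∀ (acc : List Char),
    (l.foldl (fun (pm : List Char) c =>
      pm ++ [match pm.getLast? with | none => c | some m => max m c]) acc)
    = acc ++ pvPm acc.getLast? l := by
  induction l with
  | nil => intro acc; simp [pvPm]
  | cons c t ih =>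
    intro acc
    simp only [List.foldl]
    rw [ih]
    simp [pvPm]

-- classification against pvPm equals pvGo
theorem pvZip_go (l : List Char) : ∀ (mc : Option Char),
    (((l.zip (pvPm mc l)).filter (fun p => p.1 == p.2)).map (·.1)
      = (pvGo mc l).1.reverse)
    ∧ (((l.zip (pvPm mc l)).filter (fun p => p.1 != p.2)).map (·.1)
      = (pvGo mc l).2) := by
  induction l with
  | nil => intro mc; simp [pvPm, pvGo]
  | cons c t ih =>
    intro mc
    cases mc with
    | none =>
      simp only [pvPm, pvGo]
      constructor
      · simpa using (ih (some c)).1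
      · simpa using (ih (some c)).2
    | some m =>
      by_cases h : m ≤ c
      · have hm : max m c = c := max_eq_right h
        simp only [pvPm, pvGo, hm, decide_eq_true h, if_pos]
        constructor
        · simpa using (ih (some c)).1
        · simpa using (ih (some c)).2
      · have hlt : c < m := lt_of_not_ge h
        have hm : max m c = m := max_eq_left (le_of_lt hlt)
        have hne : (c == m) = false := by
          simp; exact ne_of_lt hlt
        have hcond : (decide (m ≤ c)) = false := by simpa using h
        simp only [pvPm, pvGo, hm, hcond, if_neg, Bool.false_eq_true, not_false_iff]
        constructor
        · simp [hne, (ih (some m)).1]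
        · simp [bne, hne]
          simpa [bne] using (ih (some m)).2

-- ===== VERDICT (by name: the statement is the Claim_ definition above) =====
theorem f_spec : Claim_equal_f := by
  intro s _
  unfold Spec_f f f_alt
  dsimp only
  rw [pvA_fold, pvB_pm]
  simp only [List.getLast?_nil, List.nil_append]
  rw [(pvZip_go s.toList none).1, (pvZip_go s.toList none).2]
  simp
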